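-- pv_equiv track=rewrite | github.com/benreske/2D-FEA | 112FinalProject/main.py | getVertexIndices
-- ===== SOURCE A (Python) =====
-- def getVertexIndices(pointsList, startIndex):
--     result = []
--     for i in range(len(pointsList)):
--         if i < len(pointsList) - 1: #not the last entry
--             result.append([i + startIndex, i + startIndex + 1])
--         else: # last entry
--             result.append([i + startIndex, startIndex])
--     return result
-- ===== SOURCE B (Python) =====
-- def getVertexIndices(pointsList, startIndex):
--     nodes = list(range(startIndex, startIndex + len(pointsList)))
--     return [[a, b] for a, b in zip(nodes, nodes[1:] + nodes[:1])]
-- ===== Notes on version B (the rewrite author's own statement) =====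
-- stated objective: idiomatic
-- what changed: B precomputes the node index list and pairs each node with its cyclic successor via zip with the left-rotated list, removing A's per-iteration last-entry branch and index arithmetic.
import Mathlib
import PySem

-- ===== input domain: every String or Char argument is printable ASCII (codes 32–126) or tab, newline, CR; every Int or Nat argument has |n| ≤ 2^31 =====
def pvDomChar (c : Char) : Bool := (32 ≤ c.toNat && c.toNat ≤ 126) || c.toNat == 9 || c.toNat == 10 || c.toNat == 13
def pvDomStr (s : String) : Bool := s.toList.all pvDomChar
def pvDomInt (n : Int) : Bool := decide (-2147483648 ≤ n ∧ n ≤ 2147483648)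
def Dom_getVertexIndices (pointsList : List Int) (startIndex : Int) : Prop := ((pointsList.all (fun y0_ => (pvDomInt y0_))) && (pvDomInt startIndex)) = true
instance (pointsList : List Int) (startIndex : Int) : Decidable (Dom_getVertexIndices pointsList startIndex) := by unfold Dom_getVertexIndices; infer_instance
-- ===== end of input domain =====

-- B builds the node list once and zips it with its left rotation (cyclic successor pairing), replacing A's per-iteration last-entry branch.


-- ===== PORT A =====
def getVertexIndices (pointsList : List Int) (startIndex : Int) : List (List Int) :=
  (PySem.List.pyRange 0 pointsList.length 1).foldl
    (fun result i =>
      if i < (pointsList.length : Int) - 1 then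
        result ++ [[i + startIndex, i + startIndex + 1]]
      else
        result ++ [[i + startIndex, startIndex]])
    []

-- ===== PORT B =====
def getVertexIndices_alt (pointsList : List Int) (startIndex : Int) : List (List Int) :=
  let nodes := PySem.List.pyRange startIndex (startIndex + pointsList.length) 1
  (nodes.zip (nodes.drop 1 ++ nodes.take 1)).map (fun p => [p.1, p.2])

-- ===== PRECONDITION & SPEC =====
def Spec_getVertexIndices (pointsList : List Int) (startIndex : Int) (out : List (List Int)) : Prop := out = getVertexIndices_alt pointsList startIndex
instance (pointsList : List Int) (startIndex : Int) (out : List (List Int)) : Decidable (Spec_getVertexIndices pointsList startIndex out) := by unfold Spec_getVertexIndices; infer_instance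

-- ===== CLAIM (what is proved, stated in full; the proofs are below) =====
def Claim_equal_getVertexIndices : Prop := ∀ (pointsList : List Int) (startIndex : Int), Dom_getVertexIndices pointsList startIndex → Spec_getVertexIndices pointsList startIndex (getVertexIndices pointsList startIndex)

-- ===== LEMMAS AND PROOFS =====

-- Both sides depend only on n = pointsList.length and startIndex; prove each equal to this closed form.
theorem getVertexIndices_closed (pointsList : List Int) (s : Int) :
    getVertexIndices pointsList s =
      (PySem.List.pyRange 0 pointsList.length 1).map
        (fun i => if i < (pointsList.length : Int) - 1 then [i + s, i + s + 1] else [i + s, s]) := by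
  unfold getVertexIndices
  have h := PySem.List.foldl_congr_mem
    (l := PySem.List.pyRange 0 pointsList.length 1)
    (init := ([] : List (List Int)))
    (f := fun result i =>
      if i < (pointsList.length : Int) - 1 then
        result ++ [[i + s, i + s + 1]]
      else
        result ++ [[i + s, s]])
    (g := fun result i =>
      result ++ [if i < (pointsList.length : Int) - 1 then [i + s, i + s + 1] else [i + s, s]])
    (by intro acc x _; dsimp only; split <;> rfl)
  rw [h]
  exact PySem.List.foldl_append_singleton_eq_map _ _ _

theorem getVertexIndices_alt_closed (pointsList : List Int) (s : Int) :
    getVertexIndices_alt pointsList s =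
      (PySem.List.pyRange 0 pointsList.length 1).map
        (fun i => if i < (pointsList.length : Int) - 1 then [i + s, i + s + 1] else [i + s, s]) := by
  unfold getVertexIndices_alt
  dsimp only
  set n := pointsList.length with hn
  have hN : (PySem.List.pyRange s (s + n) 1).length = n := by
    rw [PySem.List.length_pyRange_one]; omega
  have hR : (PySem.List.pyRange 0 (n:Int) 1).length = n := by
    rw [PySem.List.length_pyRange_one]; omega
  have hnode : ∀ j (hj : j < n), (PySem.List.pyRange s (s + n) 1)[j]'(by omega) = s + j := by
    intro j hj
    exact PySem.List.getElem_pyRange_one _ _ _ _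
  apply List.ext_getElem
  · simp [List.length_zip, hN, hR]; omega
  · intro i h1 h2
    have hi : i < n := by
      have := h1; simp [List.length_zip, hN] at this; exact this.1
    rw [List.getElem_map, List.getElem_map, List.getElem_zip]
    have hRi : (PySem.List.pyRange 0 (n:Int) 1)[i]'(by omega) = (i : Int) := by
      simpa using PySem.List.getElem_pyRange_one 0 (n:Int) i (by omega)
    rw [hRi]
    by_cases hlast : i < n - 1
    · have hrot : (((PySem.List.pyRange s (s + n) 1).drop 1) ++ ((PySem.List.pyRange s (s + n) 1).take 1))[i]'(by simp [hN]; omega)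
          = s + (1 + i : Nat) := by
        rw [List.getElem_append_left (by simp [hN]; omega), List.getElem_drop,
          hnode (1+i) (by omega)]
      rw [hnode i hi, hrot, if_pos (by push_cast; omega)]
      simp only [List.cons.injEq, and_true]
      exact ⟨by ring, by push_cast; ring⟩
    · have hn1 : i = n - 1 := by omega
      have hpos : 1 ≤ n := by omega
      have hrot : (((PySem.List.pyRange s (s + n) 1).drop 1) ++ ((PySem.List.pyRange s (s + n) 1).take 1))[i]'(by simp [hN]; omega)
          = s := by
        rw [List.getElem_append_right (by simp [hN]; omega), List.getElem_take]
        simp only [List.length_drop, hN, hn1, Nat.sub_self]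
        simpa using hnode 0 (by omega)
      rw [hnode i hi, hrot, if_neg (by push_cast; omega)]
      ring_nf

-- ===== VERDICT (by name: the statement is the Claim_ definition above) =====
theorem getVertexIndices_spec : Claim_equal_getVertexIndices := by
  intro pointsList startIndex _
  unfold Spec_getVertexIndices
  rw [getVertexIndices_closed, getVertexIndices_alt_closed]
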